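-- pv_equiv track=rewrite | github.com/sharique786/Fully_Homomorphic_Encryption_Project | financial_data_analysis_v2/server/tenseal_wrapper_enhanced.py | estimate_depth
-- ===== SOURCE A (Python) =====
-- from typing import List, Any, Dict, Optional, Tuple
--
-- def estimate_depth(operation_sequence: List[str]) -> int:
--     """Estimate multiplicative depth"""
--     depth = 0
--     for op in operation_sequence:
--         if op in ['multiply', 'square', 'polynomial_degree_2']:
--             depth += 1
--         elif op in ['polynomial_degree_3']:
--             depth += 2
--         elif op in ['polynomial_degree_4', 'sigmoid_approx']:
--             depth += 2
--
--     return depth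
-- ===== SOURCE B (Python) =====
-- def estimate_depth(operation_sequence):
--     """Estimate multiplicative depth"""
--     weights = {'multiply': 1, 'square': 1, 'polynomial_degree_2': 1,
--                'polynomial_degree_3': 2, 'polynomial_degree_4': 2, 'sigmoid_approx': 2}
--     counts = {}
--     for op in operation_sequence:
--         counts[op] = counts.get(op, 0) + 1
--     return sum(weights.get(op, 0) * n for op, n in counts.items())
-- ===== Notes on version B (the rewrite author's own statement) =====
-- stated objective: alternative
-- what changed: B replaces A's per-element if/elif accumulation with a two-phase pass: build a frequency table of the operations, then sum weight*count over the distinct operations using a weight dictionary.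
import Mathlib
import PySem

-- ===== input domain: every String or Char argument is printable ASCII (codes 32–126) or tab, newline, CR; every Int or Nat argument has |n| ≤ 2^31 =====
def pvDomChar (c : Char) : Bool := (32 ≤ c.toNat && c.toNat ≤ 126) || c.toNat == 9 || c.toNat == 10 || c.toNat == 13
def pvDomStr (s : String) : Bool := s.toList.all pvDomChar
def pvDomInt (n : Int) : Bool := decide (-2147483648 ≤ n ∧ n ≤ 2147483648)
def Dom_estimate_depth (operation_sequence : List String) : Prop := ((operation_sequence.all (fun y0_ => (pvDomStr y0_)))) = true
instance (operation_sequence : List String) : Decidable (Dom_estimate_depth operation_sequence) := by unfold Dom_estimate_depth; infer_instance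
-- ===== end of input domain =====

-- B replaces A's per-element if/elif accumulation with a two-phase pass: a frequency
-- table of the operations, then a weight-dictionary dot product over distinct operations.


-- ===== PORT A =====
def estimate_depth (operation_sequence : List String) : Int :=
  operation_sequence.foldl (fun depth op =>
    if op ∈ ["multiply", "square", "polynomial_degree_2"] then depth + 1
    else if op ∈ ["polynomial_degree_3"] then depth + 2
    else if op ∈ ["polynomial_degree_4", "sigmoid_approx"] then depth + 2
    else depth) 0

-- ===== PORT B =====
def pvWeights : PySem.Dict String Int :=
  PySem.Dict.ofList [("multiply", 1), ("square", 1), ("polynomial_degree_2", 1),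
    ("polynomial_degree_3", 2), ("polynomial_degree_4", 2), ("sigmoid_approx", 2)]

def estimate_depth_alt (operation_sequence : List String) : Int :=
  let counts := operation_sequence.foldl
    (fun d op => d.insert op (d.getD op 0 + 1)) PySem.Dict.empty
  counts.items.foldl (fun acc p => acc + pvWeights.getD p.1 0 * p.2) 0

-- ===== PRECONDITION & SPEC =====
def Spec_estimate_depth (operation_sequence : List String) (out : Int) : Prop := out = estimate_depth_alt operation_sequence
instance (operation_sequence : List String) (out : Int) : Decidable (Spec_estimate_depth operation_sequence out) := by unfold Spec_estimate_depth; infer_instance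

-- ===== CLAIM (what is proved, stated in full; the proofs are below) =====
def Claim_equal_estimate_depth : Prop := ∀ (operation_sequence : List String), Dom_estimate_depth operation_sequence → Spec_estimate_depth operation_sequence (estimate_depth operation_sequence)

-- ===== LEMMAS AND PROOFS =====

-- the per-operation weight that A's if/elif chain adds
def pvW (op : String) : Int :=
  if op ∈ ["multiply", "square", "polynomial_degree_2"] then 1
  else if op ∈ ["polynomial_degree_3"] then 2
  else if op ∈ ["polynomial_degree_4", "sigmoid_approx"] then 2
  else 0

theorem getD_pvWeights (op : String) : pvWeights.getD op 0 = pvW op := by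
  by_cases h1 : op = "multiply"; · subst h1; decide
  by_cases h2 : op = "square"; · subst h2; decide
  by_cases h3 : op = "polynomial_degree_2"; · subst h3; decide
  by_cases h4 : op = "polynomial_degree_3"; · subst h4; decide
  by_cases h5 : op = "polynomial_degree_4"; · subst h5; decide
  by_cases h6 : op = "sigmoid_approx"; · subst h6; decide
  have hm : pvWeights = PySem.Dict.mk [("multiply", 1), ("square", 1), ("polynomial_degree_2", 1),
      ("polynomial_degree_3", 2), ("polynomial_degree_4", 2), ("sigmoid_approx", 2)] := by decide
  have : pvWeights.get? op = none := by
    simp only [hm, PySem.Dict.get?_mk_cons, beq_iff_eq]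
    split_ifs <;> simp_all [eq_comm, PySem.Dict.get?]
  simp [PySem.Dict.getD_eq_get?_getD, this, pvW, h1, h2, h3, h4, h5, h6]

theorem foldl_add_f {α : Type} (l : List α) (f : α → Int) (i : Int) :
    l.foldl (fun a x => a + f x) i = i + (l.map f).sum := by
  induction l generalizing i with
  | nil => simp
  | cons x xs ih => simp [List.foldl_cons, ih]; ring

theorem estimate_depth_eq_sum (ops : List String) :
    estimate_depth ops = (ops.map pvW).sum := by
  unfold estimate_depth
  have : ∀ (depth : Int) (op : String),
      (if op ∈ ["multiply", "square", "polynomial_degree_2"] then depth + 1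
       else if op ∈ ["polynomial_degree_3"] then depth + 2
       else if op ∈ ["polynomial_degree_4", "sigmoid_approx"] then depth + 2
       else depth) = depth + pvW op := by
    intro depth op; unfold pvW; split_ifs <;> simp
  simp only [this]
  simpa using foldl_add_f ops pvW 0

theorem toFinset_ofList {α : Type} [DecidableEq α] (xs : List α) :
    (PySem.Set.ofList xs).toFinset = xs.toFinset := by
  ext x; simp [PySem.Set.mem_ofList]

theorem sum_over_distinct (xs : List String) (w : String → Int) :
    ((PySem.Set.ofList xs).map (fun k => w k * (xs.count k : Int))).sum
      = (xs.map w).sum := by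
  have hnd := PySem.Set.nodup_ofList (xs := xs)
  rw [← List.sum_toFinset _ hnd, toFinset_ofList]
  have : ∀ k ∈ xs.toFinset, w k * (xs.count k : Int) = (xs.count k) • w k := by
    intro k _; simp [mul_comm]
  rw [Finset.sum_congr rfl this]
  have := Finset.sum_multiset_map_count (xs : Multiset String) w
  simpa using this.symm

-- ===== VERDICT (by name: the statement is the Claim_ definition above) =====
theorem estimate_depth_spec : Claim_equal_estimate_depth := by
  intro ops _
  unfold Spec_estimate_depth estimate_depth_alt
  rw [PySem.Dict.foldl_insert_getD_add_one_eq_counter]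
  change estimate_depth ops
    = List.foldl (fun acc p => acc + pvWeights.getD p.1 0 * p.2) 0 (PySem.Dict.counter ops).items
  rw [PySem.Dict.items_counter]
  have hfold : ∀ (l : List (String × Int)) (i : Int),
      l.foldl (fun acc p => acc + pvWeights.getD p.1 0 * p.2) i
        = i + (l.map (fun p => pvWeights.getD p.1 0 * p.2)).sum :=
    fun l i => foldl_add_f l _ i
  rw [hfold, List.map_map]
  simp only [Function.comp_def, getD_pvWeights]
  rw [estimate_depth_eq_sum, ← sum_over_distinct ops pvW]
  simp
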